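-- pv_equiv track=rewrite | github.com/htingwang/HandsOnAlgoDS | LeetCode/0378.Kth-Smallest-Element-in-a-Sorted-Matrix/Kth-Smallest-Element-In-A-Sorted-Matrix.py | find_num_by_upperbound
-- ===== SOURCE A (Python) =====
-- def find_num_by_upperbound(matrix, upperbound):
--     i = 0
--     j = len(matrix) - 1
--     count = 0
--     while i < len(matrix) and j >= 0:
--         if matrix[i][j] <= upperbound:
--             i += 1
--             count += j + 1
--         else:
--             j -= 1
--     return count
-- ===== SOURCE B (Python) =====
-- def find_num_by_upperbound(matrix, upperbound):
--     def count_from(rows, j):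
--         if not rows or j < 0:
--             return 0
--         row = rows[0]
--         while j >= 0 and row[j] > upperbound:
--             j -= 1
--         if j < 0:
--             return 0
--         return (j + 1) + count_from(rows[1:], j)
--     return count_from(matrix, len(matrix) - 1)
-- ===== Notes on version B (the rewrite author's own statement) =====
-- stated objective: alternative
-- what changed: Replaces the single while loop over the two counters i, j with an accumulator by structural recursion over the row list: a per-row inner descent of the column index j, and the per-row contributions summed back-to-front on return, with no row index and no count accumulator.
-- outside the precondition, e.g. on find_num_by_upperbound([[1, 2], [3]], 0): A returns 0, B returns 0
import Mathlib
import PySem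

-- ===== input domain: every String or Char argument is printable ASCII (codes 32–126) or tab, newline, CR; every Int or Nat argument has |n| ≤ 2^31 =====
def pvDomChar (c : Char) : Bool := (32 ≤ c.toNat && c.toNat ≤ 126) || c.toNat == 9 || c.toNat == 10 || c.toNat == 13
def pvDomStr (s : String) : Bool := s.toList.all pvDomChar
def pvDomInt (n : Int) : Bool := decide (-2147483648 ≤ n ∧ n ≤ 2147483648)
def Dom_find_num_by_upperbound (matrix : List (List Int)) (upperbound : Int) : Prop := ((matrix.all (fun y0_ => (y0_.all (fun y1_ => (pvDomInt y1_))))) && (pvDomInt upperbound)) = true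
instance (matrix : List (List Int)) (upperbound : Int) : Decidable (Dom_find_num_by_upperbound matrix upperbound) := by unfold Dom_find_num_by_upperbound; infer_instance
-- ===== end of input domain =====

-- B restructures A's two-counter while loop as structural recursion over the row list with a
-- per-row descent of the column index and back-to-front summation (alternative decomposition,
-- same cost; same return value wherever A returns without an IndexError, excluded by Pre_).

-- ===== PORT A =====
-- the while loop of A; returns count when the guard fails (index errors are excluded by Pre_)
def findLoopA (matrix : List (List Int)) (upperbound : Int) (i j count : Int) : Int :=
  if h : i < (matrix.length : Int) ∧ 0 ≤ j then
    match PySem.List.pyGet? matrix i with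
    | none => count
    | some row =>
      match PySem.List.pyGet? row j with
      | none => count
      | some v =>
        if v ≤ upperbound then findLoopA matrix upperbound (i + 1) j (count + j + 1)
        else findLoopA matrix upperbound i (j - 1) count
  else count
termination_by (((matrix.length : Int) - i).toNat, (j + 1).toNat)
decreasing_by
  · exact Prod.Lex.left _ _ (by omega)
  · exact Prod.Lex.right _ (by omega)

def find_num_by_upperbound (matrix : List (List Int)) (upperbound : Int) : Int :=
  findLoopA matrix upperbound 0 ((matrix.length : Int) - 1) 0

-- ===== PORT B =====
-- B's inner while loop: decrement j while j >= 0 and row[j] > upperbound (index error excluded by Pre_)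
def descend (row : List Int) (upperbound : Int) (j : Int) : Int :=
  if h : 0 ≤ j then
    match PySem.List.pyGet? row j with
    | none => j
    | some v => if upperbound < v then descend row upperbound (j - 1) else j
  else j
termination_by (j + 1).toNat
decreasing_by omega

-- B's count_from: structural recursion over the remaining rows, summing on return
def countFrom (upperbound : Int) : List (List Int) → Int → Int
  | [], _ => 0
  | row :: rest, j =>
    if j < 0 then 0
    else
      let j' := descend row upperbound j
      if j' < 0 then 0 else (j' + 1) + countFrom upperbound rest j'

def find_num_by_upperbound_alt (matrix : List (List Int)) (upperbound : Int) : Int :=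
  countFrom upperbound matrix ((matrix.length : Int) - 1)

-- ===== PRECONDITION & SPEC =====
-- Pre_ excludes matrices containing a row shorter than len(matrix): on those the staircase walk can
-- hit a missing column entry and raise IndexError (B probes the very same cells and raises there
-- too); on the rare short-row inputs whose walk stops early A and B both return, with equal values.
def Pre_find_num_by_upperbound (matrix : List (List Int)) (upperbound : Int) : Prop :=
  ∀ row ∈ matrix, matrix.length ≤ row.length

instance (matrix : List (List Int)) (upperbound : Int) : Decidable (Pre_find_num_by_upperbound matrix upperbound) := by
  unfold Pre_find_num_by_upperbound; infer_instance

def pvWitness_find_num_by_upperbound : List (List Int) × Int := ([[1, 2], [3, 4]], 2)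

def Spec_find_num_by_upperbound (matrix : List (List Int)) (upperbound : Int) (out : Int) : Prop := out = find_num_by_upperbound_alt matrix upperbound
instance (matrix : List (List Int)) (upperbound : Int) (out : Int) : Decidable (Spec_find_num_by_upperbound matrix upperbound out) := by unfold Spec_find_num_by_upperbound; infer_instance

-- ===== CLAIM (what is proved, stated in full; the proofs are below) =====
def Claim_equal_find_num_by_upperbound : Prop := ∀ (matrix : List (List Int)) (upperbound : Int), Dom_find_num_by_upperbound matrix upperbound → Pre_find_num_by_upperbound matrix upperbound → Spec_find_num_by_upperbound matrix upperbound (find_num_by_upperbound matrix upperbound)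

-- ===== LEMMAS AND PROOFS =====

lemma descend_neg (row : List Int) (ub j : Int) (h : j < 0) : descend row ub j = j := by
  rw [descend, dif_neg (by omega)]

lemma loopA_eq_countFrom (matrix : List (List Int)) (ub : Int)
    (h1 : ∀ row ∈ matrix, matrix.length ≤ row.length) :
    ∀ (d : Nat) (i j count : Int),
      ((matrix.length : Int) - i).toNat + (j + 1).toNat ≤ d → 0 ≤ i →
      j < (matrix.length : Int) →
      findLoopA matrix ub i j count = count + countFrom ub (matrix.drop i.toNat) j := by
  intro d
  induction d with
  | zero =>
    intro i j count hd h0 hjn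
    rw [findLoopA, dif_neg (by omega)]
    rw [List.drop_eq_nil_of_le (by omega)]
    simp [countFrom]
  | succ d ih =>
    intro i j count hd h0 hjn
    rw [findLoopA]
    by_cases hg : i < (matrix.length : Int) ∧ 0 ≤ j
    · rw [dif_pos hg]
      obtain ⟨hgi, hgj⟩ := hg
      have hil : i.toNat < matrix.length := by omega
      rw [PySem.List.pyGet?_eq_some_getElem matrix h0 hgi]
      dsimp only
      set row := matrix[i.toNat]'(by omega) with hrow
      have hmem : row ∈ matrix := List.getElem_mem hil
      have hrlen : matrix.length ≤ row.length := h1 row hmem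
      have hjl : j < (row.length : Int) := by omega
      rw [PySem.List.pyGet?_eq_some_getElem row hgj hjl]
      dsimp only
      have hdrop : matrix.drop i.toNat = row :: matrix.drop (i.toNat + 1) :=
        List.drop_eq_getElem_cons hil
      by_cases hcmp : row[j.toNat]'(by omega) ≤ ub
      · rw [if_pos hcmp]
        have hdes : descend row ub j = j := by
          rw [descend, dif_pos hgj, PySem.List.pyGet?_eq_some_getElem row hgj hjl]
          dsimp only
          rw [if_neg (by omega)]
        rw [ih (i + 1) j (count + j + 1) (by omega) (by omega) hjn]
        rw [hdrop]
        have hi1 : (i + 1).toNat = i.toNat + 1 := by omega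
        rw [hi1]
        simp only [countFrom, if_neg (show ¬ j < 0 by omega), hdes]
        ring
      · rw [if_neg hcmp]
        have hdes : descend row ub j = descend row ub (j - 1) := by
          rw [descend, dif_pos hgj, PySem.List.pyGet?_eq_some_getElem row hgj hjl]
          dsimp only
          rw [if_pos (by omega)]
        rw [ih i (j - 1) count (by omega) h0 (by omega)]
        rw [hdrop]
        by_cases hj0 : j - 1 < 0
        · have hdes1 : descend row ub j = j - 1 := by
            rw [hdes]; exact descend_neg row ub (j - 1) hj0
          simp only [countFrom, if_neg (show ¬ j < 0 by omega), hdes1]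
          rw [if_pos hj0, if_pos hj0]
        · simp only [countFrom, if_neg (show ¬ j < 0 by omega), if_neg hj0, hdes]
    · rw [dif_neg hg]
      by_cases hin : (matrix.length : Int) ≤ i
      · rw [List.drop_eq_nil_of_le (by omega)]
        simp [countFrom]
      · have hij : j < 0 := by
          rcases not_and_or.mp hg with hbad | hbad
          · omega
          · omega
        have hil : i.toNat < matrix.length := by omega
        rw [List.drop_eq_getElem_cons hil]
        simp only [countFrom, if_pos hij]
        ring

-- ===== VERDICT (by name: the statement is the Claim_ definition above) =====
theorem find_num_by_upperbound_spec : Claim_equal_find_num_by_upperbound := by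
  intro matrix ub _ hpre
  unfold Spec_find_num_by_upperbound find_num_by_upperbound find_num_by_upperbound_alt
  rw [loopA_eq_countFrom matrix ub hpre (matrix.length + matrix.length) 0
      ((matrix.length : Int) - 1) 0 (by omega) (by omega) (by omega)]
  simp
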